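-- pv_equiv track=rewrite | github.com/unnat-bhatt/MegaProject-2-AI-Chatbot-GitHub | New_program.py | is_last_message_from_sender
-- ===== SOURCE A (Python) =====
-- def is_last_message_from_sender(chat_text, sender_name="Your_Friend"):
--     lines = chat_text.strip().split('\n')
--     last_sender = None
--
--     for line in lines:
--         if line.startswith('[') and '] ' in line:
--             try:
--                 timestamp_and_rest = line.split('] ', 1)
--                 if len(timestamp_and_rest) != 2:
--                     continue
--                 rest = timestamp_and_rest[1]
--                 if ': ' in rest:
--                     sender, _ = rest.split(': ', 1)
--                     last_sender = sender.strip()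
--             except Exception:
--                 continue
--
--     return last_sender == sender_name
-- ===== SOURCE B (Python) =====
-- def is_last_message_from_sender(chat_text, sender_name="Your_Friend"):
--     for line in reversed(chat_text.strip().split('\n')):
--         if line.startswith('[') and '] ' in line:
--             _, rest = line.split('] ', 1)
--             if ': ' in rest:
--                 sender, _ = rest.split(': ', 1)
--                 return sender.strip() == sender_name
--     return False
-- ===== Notes on version B (the rewrite author's own statement) =====
-- stated objective: simpler
-- what changed: B scans the lines in reverse and returns immediately at the first valid message line (no try/except, no last_sender state), instead of A's forward pass that overwrites a last_sender accumulator on every valid line.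
import Mathlib
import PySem

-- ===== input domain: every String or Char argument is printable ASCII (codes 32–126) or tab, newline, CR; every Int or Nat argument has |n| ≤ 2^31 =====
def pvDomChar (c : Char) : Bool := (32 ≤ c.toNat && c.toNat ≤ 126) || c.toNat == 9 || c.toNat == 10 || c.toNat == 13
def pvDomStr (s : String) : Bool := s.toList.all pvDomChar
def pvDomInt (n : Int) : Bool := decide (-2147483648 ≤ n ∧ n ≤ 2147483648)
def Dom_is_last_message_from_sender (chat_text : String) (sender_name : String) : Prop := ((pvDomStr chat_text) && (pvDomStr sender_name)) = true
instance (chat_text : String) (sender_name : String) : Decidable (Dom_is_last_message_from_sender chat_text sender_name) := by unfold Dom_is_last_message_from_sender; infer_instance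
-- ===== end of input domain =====

-- B scans the lines in reverse and returns at the first valid message line, instead of
-- A's forward pass that keeps overwriting a last_sender accumulator; same return value.

-- ===== PORT A =====
-- loop body of A (named so the proofs can speak about it); every `except`-caught path keeps last_sender
def pvStepA (last_sender : Option String) (line : String) : Option String :=
  if PySem.Str.startswith line "[" && PySem.Str.isIn "] " line then
    match PySem.Str.splitMax? line "] " 1 with
    | none => last_sender  -- ValueError (empty sep): unreachable, the sep "] " is non-empty
    | some timestamp_and_rest =>
      if timestamp_and_rest.length ≠ 2 then last_sender
      else
        match PySem.List.pyGet? timestamp_and_rest 1 with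
        | none => last_sender  -- IndexError caught by the except
        | some rest =>
          if PySem.Str.isIn ": " rest then
            match PySem.Str.splitMax? rest ": " 1 with
            | some [sender, _] => some (PySem.Str.strip sender)
            | _ => last_sender  -- unpacking ValueError caught by the except
          else last_sender
  else last_sender

def is_last_message_from_sender (chat_text : String) (sender_name : String) : Bool :=
  match PySem.Str.split? (PySem.Str.strip chat_text) "\n" with
  | none => false  -- ValueError (empty sep): unreachable, the sep "\n" is non-empty
  | some lines =>
    match lines.foldl pvStepA none with
    | some last_sender => last_sender == sender_name
    | none => false  -- None == sender_name is False (sender_name is a str)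

-- ===== PORT B =====
-- B's loop: the first valid line of the reversed line list decides; exhaustion gives False
def pvScanRev (sender_name : String) : List String → Bool
  | [] => false
  | line :: more =>
    if PySem.Str.startswith line "[" && PySem.Str.isIn "] " line then
      match PySem.Str.splitMax? line "] " 1 with
      | some [_, rest] =>
        if PySem.Str.isIn ": " rest then
          match PySem.Str.splitMax? rest ": " 1 with
          | some [sender, _] => PySem.Str.strip sender == sender_name
          | _ => pvScanRev sender_name more  -- unreachable: ': ' in rest forces a 2-way split
        else pvScanRev sender_name more
      | _ => pvScanRev sender_name more  -- unreachable: '] ' in line forces a 2-way split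
    else pvScanRev sender_name more

def is_last_message_from_sender_alt (chat_text : String) (sender_name : String) : Bool :=
  match PySem.Str.split? (PySem.Str.strip chat_text) "\n" with
  | none => false  -- unreachable, as in A
  | some lines => pvScanRev sender_name lines.reverse

-- ===== PRECONDITION & SPEC =====
def Spec_is_last_message_from_sender (chat_text : String) (sender_name : String) (out : Bool) : Prop := out = is_last_message_from_sender_alt chat_text sender_name
instance (chat_text : String) (sender_name : String) (out : Bool) : Decidable (Spec_is_last_message_from_sender chat_text sender_name out) := by unfold Spec_is_last_message_from_sender; infer_instance

-- ===== CLAIM (what is proved, stated in full; the proofs are below) =====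
def Claim_equal_is_last_message_from_sender : Prop := ∀ (chat_text : String) (sender_name : String), Dom_is_last_message_from_sender chat_text sender_name → Spec_is_last_message_from_sender chat_text sender_name (is_last_message_from_sender chat_text sender_name)

-- ===== LEMMAS AND PROOFS =====

-- the sender a single line contributes, if any (shared characterisation of both loop bodies)
def pvExtract (line : String) : Option String :=
  if PySem.Str.startswith line "[" && PySem.Str.isIn "] " line then
    match PySem.Str.splitMax? line "] " 1 with
    | some [_, rest] =>
      if PySem.Str.isIn ": " rest then
        match PySem.Str.splitMax? rest ": " 1 with
        | some [sender, _] => some (PySem.Str.strip sender)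
        | _ => none
      else none
    | _ => none
  else none

theorem pvStepA_eq (ls : Option String) (line : String) :
    pvStepA ls line = (pvExtract line).or ls := by
  unfold pvStepA pvExtract
  by_cases hg : (PySem.Str.startswith line "[" && PySem.Str.isIn "] " line) = true
  · rw [if_pos hg, if_pos hg]
    cases h : PySem.Str.splitMax? line "] " 1 with
    | none => rfl
    | some tr =>
      rcases tr with _ | ⟨a, _ | ⟨b, _ | ⟨c, t⟩⟩⟩
      · rfl
      · rfl
      · by_cases hc : PySem.Chars.isIn [':', ' '] b.toList = true
        · cases h2 : PySem.Str.splitMax? b ": " 1 with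
          | none =>
            simp [hc, h2, Option.or]
          | some sp =>
            rcases sp with _ | ⟨s, _ | ⟨u, _ | ⟨v, w⟩⟩⟩ <;>
              simp [hc, h2, Option.or]
        · simp [hc, Option.or]
      · rfl
  · rw [if_neg hg, if_neg hg]; rfl

theorem pvScanRev_cons (sn line : String) (more : List String) :
    pvScanRev sn (line :: more) =
      match pvExtract line with
      | some s => s == sn
      | none => pvScanRev sn more := by
  rw [pvScanRev]
  unfold pvExtract
  by_cases hg : (PySem.Str.startswith line "[" && PySem.Str.isIn "] " line) = true
  · rw [if_pos hg, if_pos hg]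
    cases h : PySem.Str.splitMax? line "] " 1 with
    | none => rfl
    | some tr =>
      rcases tr with _ | ⟨a, _ | ⟨b, _ | ⟨c, t⟩⟩⟩
      · rfl
      · rfl
      · by_cases hc : PySem.Chars.isIn [':', ' '] b.toList = true
        · cases h2 : PySem.Str.splitMax? b ": " 1 with
          | none => simp [hc, h2]
          | some sp => rcases sp with _ | ⟨s, _ | ⟨u, _ | ⟨v, w⟩⟩⟩ <;> simp [hc, h2]
        · simp [hc]
      · rfl
  · rw [if_neg hg, if_neg hg]

theorem pvFoldl_eq (lines : List String) :
    ∀ ls : Option String, lines.foldl pvStepA ls = (lines.reverse.findSome? pvExtract).or ls := by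
  induction lines with
  | nil => intro ls; simp
  | cons l t ih =>
    intro ls
    simp only [List.foldl_cons, ih, pvStepA_eq, List.reverse_cons, List.findSome?_append,
      Option.or_assoc]
    cases hpe : pvExtract l <;> simp [List.findSome?, hpe]

theorem pvScanRev_eq (sn : String) (lines : List String) :
    pvScanRev sn lines =
      match lines.findSome? pvExtract with
      | some s => s == sn
      | none => false := by
  induction lines with
  | nil => rfl
  | cons l t ih =>
    rw [pvScanRev_cons]
    cases h : pvExtract l <;> simp [h, ih]

-- ===== VERDICT (by name: the statement is the Claim_ definition above) =====
theorem is_last_message_from_sender_spec : Claim_equal_is_last_message_from_sender := by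
  intro chat_text sender_name _
  unfold Spec_is_last_message_from_sender
  unfold is_last_message_from_sender is_last_message_from_sender_alt
  cases h : PySem.Str.split? (PySem.Str.strip chat_text) "\n" with
  | none => rfl
  | some lines =>
    show (match lines.foldl pvStepA none with
          | some last_sender => last_sender == sender_name
          | none => false) = pvScanRev sender_name lines.reverse
    rw [pvFoldl_eq, pvScanRev_eq]
    cases h2 : lines.reverse.findSome? pvExtract <;> rfl
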